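-- pv_equiv track=rewrite | github.com/sdbuch/spring2024-assignment1-basics | cs336_basics/tokenizer/tests.py | find_partial_special_token_match
-- ===== SOURCE A (Python) =====
-- from typing import Iterator, List
--
-- def find_partial_special_token_match(text: str, special_tokens: List[str]) -> int:
--     """
--     Check if the end of text partially matches any special token.
--     Returns the number of additional characters needed to complete the potential match.
--     """
--     if not special_tokens:
--         return 0
--
--     # Sort special tokens by length in descending order
--     sorted_tokens = sorted(special_tokens, key=len, reverse=True)
--     max_token_len = len(sorted_tokens[0])
--
--     # Check for partial matches at the end of the text
--     for i in range(min(max_token_len, len(text))):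
--         suffix = text[-(i + 1) :]
--         for token in sorted_tokens:
--             if token.startswith(suffix):
--                 # Return how many more characters we need
--                 return len(token) - len(suffix)
--     return 0
-- ===== SOURCE B (Python) =====
-- from typing import List
--
-- def find_partial_special_token_match(text: str, special_tokens: List[str]) -> int:
--     """
--     Token-outer pass: for each special token (longest first, stable), find the
--     smallest suffix length L of text that is a prefix of the token; keep the
--     globally smallest L (earlier token wins ties) and return its completion.
--     """
--     best = None  # (L, completion)
--     for token in sorted(special_tokens, key=len, reverse=True):
--         for L in range(1, min(len(token), len(text)) + 1):
--             if text[-L:] == token[:L]: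
--                 if best is None or L < best[0]:
--                     best = (L, len(token) - L)
--                 break
--     return best[1] if best is not None else 0
-- ===== Notes on version B (the rewrite author's own statement) =====
-- stated objective: alternative
-- what changed: Replaced A's suffix-length-outer loop (for each suffix length, scan all sorted tokens) by a token-outer pass that computes each token's smallest matching suffix length with an early break and keeps the global minimum with an earlier-token tie-break.
import Mathlib
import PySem

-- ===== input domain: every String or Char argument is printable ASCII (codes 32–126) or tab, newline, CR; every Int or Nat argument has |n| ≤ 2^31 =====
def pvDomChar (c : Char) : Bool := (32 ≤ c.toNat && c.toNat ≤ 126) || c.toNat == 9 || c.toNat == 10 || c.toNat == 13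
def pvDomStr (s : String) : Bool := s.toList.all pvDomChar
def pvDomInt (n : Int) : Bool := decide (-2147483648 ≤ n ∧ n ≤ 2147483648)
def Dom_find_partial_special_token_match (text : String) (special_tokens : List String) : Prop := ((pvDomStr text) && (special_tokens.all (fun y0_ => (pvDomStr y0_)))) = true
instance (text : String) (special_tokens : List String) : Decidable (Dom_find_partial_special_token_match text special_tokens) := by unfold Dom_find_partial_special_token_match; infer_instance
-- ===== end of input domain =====

-- B replaces A's suffix-length-outer scan by a token-outer pass (per-token minimal matching
-- suffix length with early break, global min with earlier-token tie-break); alternative, same cost.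


-- ===== PORT A =====
-- A's outer loop: for i in range(min(max_token_len, len(text))): suffix = text[-(i+1):];
-- the first token (in sorted order) with token.startswith(suffix) returns len(token) - len(suffix).
def pvALoop (T : List Char) (S : List (List Char)) : List Nat → Int
  | [] => 0
  | i :: rest =>
    let suffix := PySem.List.slice T (some (-((i : Int) + 1))) none
    match S.find? (fun tok => PySem.Chars.startswith tok suffix) with
    | some tok => (tok.length : Int) - (suffix.length : Int)
    | none => pvALoop T S rest

def find_partial_special_token_match (text : String) (special_tokens : List String) : Int :=
  if special_tokens = [] then 0
  else
    let sorted_tokens := PySem.List.sorted (special_tokens.map String.toList) (fun t => t.length) true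
    let max_token_len := (sorted_tokens.headD []).length
    pvALoop text.toList sorted_tokens (List.range (min max_token_len text.toList.length))

-- ===== PORT B =====
-- B's inner loop: for L in range(1, min(len(token), len(text)) + 1): if text[-L:] == token[:L]: break
def pvBInner (T : List Char) (tok : List Char) : List Nat → Option Nat
  | [] => none
  | L :: rest =>
    if PySem.List.slice T (some (-(L : Int))) none = PySem.List.slice tok none (some (L : Int)) then some L
    else pvBInner T tok rest

-- one token step: best = (L, completion) is replaced only when this token's minimal L strictly improves
def pvBStep (T : List Char) (best : Option (Nat × Int)) (tok : List Char) : Option (Nat × Int) :=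
  match pvBInner T tok (List.range' 1 (min tok.length T.length)) with
  | none => best
  | some L =>
    match best with
    | none => some (L, (tok.length : Int) - (L : Int))
    | some (bL, c) => if L < bL then some (L, (tok.length : Int) - (L : Int)) else some (bL, c)

def find_partial_special_token_match_alt (text : String) (special_tokens : List String) : Int :=
  let T := text.toList
  let S := PySem.List.sorted (special_tokens.map String.toList) (fun t => t.length) true
  match S.foldl (pvBStep T) none with
  | none => 0
  | some (_, c) => c

-- ===== PRECONDITION & SPEC =====
def Spec_find_partial_special_token_match (text : String) (special_tokens : List String) (out : Int) : Prop := out = find_partial_special_token_match_alt text special_tokens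
instance (text : String) (special_tokens : List String) (out : Int) : Decidable (Spec_find_partial_special_token_match text special_tokens out) := by unfold Spec_find_partial_special_token_match; infer_instance

-- ===== CLAIM (what is proved, stated in full; the proofs are below) =====
def Claim_equal_find_partial_special_token_match : Prop := ∀ (text : String) (special_tokens : List String), Dom_find_partial_special_token_match text special_tokens → Spec_find_partial_special_token_match text special_tokens (find_partial_special_token_match text special_tokens)

-- ===== LEMMAS AND PROOFS =====

-- the common match predicate: the length-L suffix of T equals the length-L prefix of tok
def pvQ (T : List Char) (L : Nat) (tok : List Char) : Bool :=
  decide (T.drop (T.length - L) = tok.take L)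

-- a match of length L ≤ |T| fits inside the token
theorem pvQ_le (T : List Char) (L : Nat) (tok : List Char) (hq : pvQ T L tok = true)
    (hn : L ≤ T.length) : L ≤ tok.length := by
  have h := of_decide_eq_true hq
  have h2 := congrArg List.length h
  simp only [List.length_drop, List.length_take] at h2
  omega

-- A's loop normalized to suffix lengths L = i+1 and the predicate pvQ
def pvAFun (T : List Char) (S : List (List Char)) : List Nat → Int
  | [] => 0
  | L :: rest =>
    match S.find? (pvQ T L) with
    | some tok => (tok.length : Int) - (L : Int)
    | none => pvAFun T S rest

theorem pvALoop_norm (T : List Char) (S : List (List Char)) :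
    ∀ is : List Nat, (∀ i ∈ is, i + 1 ≤ T.length) →
      pvALoop T S is = pvAFun T S (is.map (· + 1)) := by
  intro is
  induction is with
  | nil => intro _; rfl
  | cons i rest ih =>
    intro h
    have hi : i + 1 ≤ T.length := h i (by simp)
    have hs : PySem.List.slice T (some (-((i : Int) + 1))) none = List.drop (T.length - (i + 1)) T := by
      have h2 := PySem.List.slice_from_neg_natCast T (i + 1) (Nat.succ_pos i)
      push_cast at h2
      exact h2
    have hlen : (List.drop (T.length - (i + 1)) T).length = i + 1 := by
      rw [List.length_drop]; omega
    have hpred : ∀ tok : List Char,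
        PySem.Chars.startswith tok (List.drop (T.length - (i + 1)) T) = pvQ T (i + 1) tok := by
      intro tok
      rw [Bool.eq_iff_iff, PySem.Chars.startswith_iff, List.prefix_iff_eq_take, hlen]
      simp [pvQ]
    simp only [pvALoop, pvAFun, List.map_cons, hs, hpred]
    cases hfind : S.find? (pvQ T (i + 1)) with
    | none => simpa using ih (fun j hj => h j (List.mem_cons_of_mem _ hj))
    | some tok => simp [hlen]

-- left-biased min on the first component
def pvMerge (a b : Option (Nat × Int)) : Option (Nat × Int) :=
  match a, b with
  | none, b => b
  | some a, none => some a
  | some (La, ca), some (Lb, cb) => if Lb < La then some (Lb, cb) else some (La, ca)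

theorem pvMerge_assoc (a b c : Option (Nat × Int)) :
    pvMerge (pvMerge a b) c = pvMerge a (pvMerge b c) := by
  rcases a with _ | ⟨La, ca⟩
  · rfl
  · rcases b with _ | ⟨Lb, cb⟩
    · rfl
    · rcases c with _ | ⟨Lc, cc⟩
      · by_cases h1 : Lb < La <;> simp [pvMerge, h1]
      · by_cases h1 : Lb < La <;> by_cases h2 : Lc < Lb
        · have h3 : Lc < La := lt_trans h2 h1
          simp [pvMerge, h1, h2, h3]
        · simp [pvMerge, h1, h2]
        · simp [pvMerge, h1, h2]
        · have h3 : ¬ Lc < La := by omega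
          simp [pvMerge, h1, h2, h3]

-- this token's contribution: its minimal matching L with the completion value
def pvTokRes (T tok : List Char) : Option (Nat × Int) :=
  (pvBInner T tok (List.range' 1 (min tok.length T.length))).map
    (fun L => (L, (tok.length : Int) - (L : Int)))

theorem pvBStep_eq_merge (T : List Char) (best : Option (Nat × Int)) (tok : List Char) :
    pvBStep T best tok = pvMerge best (pvTokRes T tok) := by
  rcases hI : pvBInner T tok (List.range' 1 (min tok.length T.length)) with _ | L <;>
    rcases best with _ | ⟨bL, c⟩ <;>
      simp [pvBStep, pvTokRes, hI, pvMerge]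

def pvBest (T : List Char) : List (List Char) → Option (Nat × Int)
  | [] => none
  | t :: S => pvMerge (pvTokRes T t) (pvBest T S)

theorem pvFoldl_merge (T : List Char) :
    ∀ (S : List (List Char)) (b : Option (Nat × Int)),
      S.foldl (pvBStep T) b = pvMerge b (pvBest T S) := by
  intro S
  induction S with
  | nil => intro b; cases b <;> rfl
  | cons t S ih =>
    intro b
    rw [List.foldl_cons, pvBStep_eq_merge, ih, pvMerge_assoc]
    rfl

-- pvBInner is find? of pvQ over its range
theorem pvBInner_eq_find? (T tok : List Char) :
    ∀ ls : List Nat, (∀ L ∈ ls, 1 ≤ L ∧ L ≤ T.length) →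
      pvBInner T tok ls = ls.find? (fun L => pvQ T L tok) := by
  intro ls
  induction ls with
  | nil => intro _; rfl
  | cons L rest ih =>
    intro h
    obtain ⟨h1, h2⟩ := h L (by simp)
    have hsl : PySem.List.slice T (some (-(L : Int))) none = List.drop (T.length - L) T :=
      PySem.List.slice_from_neg_natCast T L h1
    have hsr : PySem.List.slice tok none (some (L : Int)) = List.take L tok :=
      PySem.List.slice_to_natCast tok L
    simp only [pvBInner, hsl, hsr]
    by_cases hq : List.drop (T.length - L) T = List.take L tok
    · rw [if_pos hq, List.find?_cons_of_pos (by simp [pvQ, hq])]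
    · rw [if_neg hq, List.find?_cons_of_neg (by simp [pvQ, hq]),
          ih (fun x hx => h x (List.mem_cons_of_mem _ hx))]

-- the per-token search range can be extended to the common range [1..K]
theorem pvFind?_extend (T tok : List Char) (K : Nat) (hK : K ≤ T.length)
    (htok : min tok.length T.length ≤ K) :
    (List.range' 1 (min tok.length T.length)).find? (fun L => pvQ T L tok)
      = (List.range' 1 K).find? (fun L => pvQ T L tok) := by
  have hsplit : List.range' 1 K
      = List.range' 1 (min tok.length T.length)
        ++ List.range' (1 + min tok.length T.length) (K - min tok.length T.length) := by
    rw [List.range'_append_1]; congr 1; omega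
  have hnone : (List.range' (1 + min tok.length T.length) (K - min tok.length T.length)).find?
      (fun L => pvQ T L tok) = none := by
    rw [List.find?_eq_none]
    intro L hL hq
    obtain ⟨hL1, hL2⟩ := List.mem_range'_1.mp hL
    have hLn : L ≤ T.length := by omega
    have hle := pvQ_le T L tok hq hLn
    omega
  rw [hsplit, List.find?_append, hnone, Option.or_none]

-- pvBest with every token searched over the common range [1..K]
def pvBest' (T : List Char) (K : Nat) : List (List Char) → Option (Nat × Int)
  | [] => none
  | t :: S =>
    pvMerge (((List.range' 1 K).find? (fun L => pvQ T L t)).map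
      (fun L => (L, (t.length : Int) - (L : Int)))) (pvBest' T K S)

theorem pvBest_eq_best' (T : List Char) (K : Nat) (hK : K ≤ T.length) :
    ∀ S : List (List Char), (∀ tok ∈ S, min tok.length T.length ≤ K) →
      pvBest T S = pvBest' T K S := by
  intro S
  induction S with
  | nil => intro _; rfl
  | cons t S ih =>
    intro h
    have hcond : ∀ L ∈ List.range' 1 (min t.length T.length), 1 ≤ L ∧ L ≤ T.length := by
      intro L hL
      obtain ⟨hL1, hL2⟩ := List.mem_range'_1.mp hL
      have := Nat.min_le_right t.length T.length
      omega
    simp only [pvBest, pvBest', pvTokRes]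
    rw [pvBInner_eq_find? T t _ hcond, pvFind?_extend T t K hK (h t (by simp)),
        ih (fun x hx => h x (List.mem_cons_of_mem _ hx))]

-- left-biased min of two optional values
def pvMinLeft (a b : Option Nat) : Option Nat :=
  match a, b with
  | none, b => b
  | some a, none => some a
  | some x, some y => if y < x then some y else some x

-- find? of a disjunction over a strictly increasing list is the left-biased min of the find?s
theorem pvFind?_or (p r : Nat → Bool) :
    ∀ ls : List Nat, ls.Pairwise (· < ·) →
      ls.find? (fun x => p x || r x) = pvMinLeft (ls.find? p) (ls.find? r) := by
  intro ls
  induction ls with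
  | nil => intro _; rfl
  | cons x ls ih =>
    intro hpw
    obtain ⟨hx, hpw'⟩ := List.pairwise_cons.mp hpw
    cases hp : p x with
    | true =>
      cases hr : r x with
      | true =>
        rw [List.find?_cons_of_pos (p := fun x => p x || r x) (show (p x || r x) = true by simp [hp]),
            List.find?_cons_of_pos hp, List.find?_cons_of_pos hr]
        simp [pvMinLeft]
      | false =>
        rw [List.find?_cons_of_pos (p := fun x => p x || r x) (show (p x || r x) = true by simp [hp]),
            List.find?_cons_of_pos hp, List.find?_cons_of_neg (by simp [hr])]
        cases hfr : ls.find? r with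
        | none => rfl
        | some y =>
          have hy := hx y (List.mem_of_find?_eq_some hfr)
          simp [pvMinLeft, Nat.lt_asymm hy]
    | false =>
      cases hr : r x with
      | true =>
        rw [List.find?_cons_of_pos (p := fun x => p x || r x) (show (p x || r x) = true by simp [hp, hr]),
            List.find?_cons_of_neg (by simp [hp]), List.find?_cons_of_pos hr]
        cases hfp : ls.find? p with
        | none => rfl
        | some y =>
          have hy := hx y (List.mem_of_find?_eq_some hfp)
          simp [pvMinLeft, hy]
      | false =>
        rw [List.find?_cons_of_neg (p := fun x => p x || r x) (show ¬ (p x || r x) = true by simp [hp, hr]),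
            List.find?_cons_of_neg (by simp [hp]), List.find?_cons_of_neg (by simp [hr])]
        exact ih hpw'

-- on a strictly increasing list, everything before the first hit fails the predicate
theorem pvFind?_first (p : Nat → Bool) :
    ∀ ls : List Nat, ls.Pairwise (· < ·) → ∀ x, ls.find? p = some x →
      ∀ y ∈ ls, y < x → p y = false := by
  intro ls
  induction ls with
  | nil => intro _ x hx; simp at hx
  | cons z ls ih =>
    intro hpw x hfind y hy hyx
    obtain ⟨hz, hpw'⟩ := List.pairwise_cons.mp hpw
    cases hpz : p z with
    | true =>
      rw [List.find?_cons_of_pos hpz] at hfind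
      injection hfind with hzx
      subst hzx
      rcases List.mem_cons.mp hy with rfl | hy'
      · exact absurd hyx (lt_irrefl _)
      · exact absurd hyx (not_lt.mpr (le_of_lt (hz y hy')))
    | false =>
      rw [List.find?_cons_of_neg (by simp [hpz])] at hfind
      rcases List.mem_cons.mp hy with rfl | hy'
      · exact hpz
      · exact ih hpw' x hfind y hy' hyx

-- when any element matches, find? returns one
theorem pvAny_find? (S : List (List Char)) (p : List Char → Bool) (h : S.any p = true) :
    ∃ t, S.find? p = some t := by
  cases hf : S.find? p with
  | some t => exact ⟨t, rfl⟩
  | none =>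
    rw [List.find?_eq_none] at hf
    obtain ⟨u, hu, hpu⟩ := List.any_eq_true.mp h
    exact absurd hpu (hf u hu)

-- characterization of pvBest': first L in [1..K] matched by any token, paired with the first such token
theorem pvBest'_char (T : List Char) (K : Nat) :
    ∀ S : List (List Char),
      pvBest' T K S =
        match (List.range' 1 K).find? (fun L => S.any (pvQ T L)) with
        | none => none
        | some L => (S.find? (pvQ T L)).map (fun t => (L, (t.length : Int) - (L : Int))) := by
  intro S
  induction S with
  | nil =>
    simp only [pvBest']
    cases hf : (List.range' 1 K).find? (fun L => ([] : List (List Char)).any (pvQ T L)) with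
    | none => rfl
    | some L =>
      have h := List.find?_some hf
      simp at h
  | cons t S ih =>
    have hpw : (List.range' 1 K).Pairwise (· < ·) := List.pairwise_lt_range' 1
    have hscrut : (List.range' 1 K).find? (fun L => (t :: S).any (pvQ T L))
        = pvMinLeft ((List.range' 1 K).find? (fun L => pvQ T L t))
                    ((List.range' 1 K).find? (fun L => S.any (pvQ T L))) := by
      have h := pvFind?_or (fun L => pvQ T L t) (fun L => S.any (pvQ T L)) (List.range' 1 K) hpw
      simpa [List.any_cons] using h
    simp only [pvBest', ih, hscrut]
    cases hft : (List.range' 1 K).find? (fun L => pvQ T L t) with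
    | none =>
      cases hfS : (List.range' 1 K).find? (fun L => S.any (pvQ T L)) with
      | none => rfl
      | some L =>
        have hqt : ¬ pvQ T L t = true :=
          List.find?_eq_none.mp hft L (List.mem_of_find?_eq_some hfS)
        simp [pvMerge, pvMinLeft, List.find?_cons_of_neg hqt]
    | some L0 =>
      have hq0 : pvQ T L0 t = true := by simpa using List.find?_some hft
      cases hfS : (List.range' 1 K).find? (fun L => S.any (pvQ T L)) with
      | none => simp [pvMerge, pvMinLeft, List.find?_cons_of_pos hq0]
      | some L1 =>
        have hanyS : S.any (pvQ T L1) = true := by simpa using List.find?_some hfS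
        obtain ⟨t1, ht1⟩ := pvAny_find? S _ hanyS
        by_cases hlt : L1 < L0
        · have hq1 : pvQ T L1 t = false :=
            pvFind?_first (fun L => pvQ T L t) (List.range' 1 K) hpw L0 hft L1
              (List.mem_of_find?_eq_some hfS) hlt
          simp [pvMerge, pvMinLeft, hlt, ht1,
            List.find?_cons_of_neg (show ¬ pvQ T L1 t = true by simp [hq1])]
        · simp [pvMerge, pvMinLeft, hlt, ht1, List.find?_cons_of_pos hq0]

-- characterization of pvAFun
theorem pvAFun_char (T : List Char) (S : List (List Char)) :
    ∀ ls : List Nat,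
      pvAFun T S ls =
        match ls.find? (fun L => S.any (pvQ T L)) with
        | none => 0
        | some L =>
          match S.find? (pvQ T L) with
          | some tok => (tok.length : Int) - (L : Int)
          | none => 0 := by
  intro ls
  induction ls with
  | nil => rfl
  | cons L rest ih =>
    simp only [pvAFun]
    cases hf : S.find? (pvQ T L) with
    | some tok =>
      have hany : S.any (pvQ T L) = true :=
        List.any_eq_true.mpr ⟨tok, List.mem_of_find?_eq_some hf, List.find?_some hf⟩
      rw [List.find?_cons_of_pos (p := fun L => S.any (pvQ T L)) (show S.any (pvQ T L) = true from hany)]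
      simp [hf]
    | none =>
      have hany : S.any (pvQ T L) = false := by
        rw [List.find?_eq_none] at hf
        exact List.any_eq_false.mpr (fun x hx => hf x hx)
      rw [List.find?_cons_of_neg (by simp [hany])]
      exact ih

-- ===== VERDICT (by name: the statement is the Claim_ definition above) =====
theorem find_partial_special_token_match_spec : Claim_equal_find_partial_special_token_match := by
  intro text toks _
  unfold Spec_find_partial_special_token_match
  by_cases hnil : toks = []
  · subst hnil; rfl
  · simp only [find_partial_special_token_match, find_partial_special_token_match_alt, if_neg hnil]
    generalize hS : PySem.List.sorted (toks.map String.toList) (fun t => t.length) true = S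
    have hSne : S ≠ [] := by
      rw [← hS, Ne, PySem.List.sorted_eq_nil_iff]
      simpa using hnil
    obtain ⟨m, S', hcons⟩ := List.exists_cons_of_ne_nil hSne
    have hbound : ∀ tok ∈ S,
        min tok.length text.toList.length ≤ min (S.headD []).length text.toList.length := by
      intro tok htok
      have hmem : tok ∈ toks.map String.toList := by
        rw [← hS] at htok
        exact (PySem.List.mem_sorted _ _ _ _).mp htok
      have hle : tok.length ≤ m.length :=
        PySem.List.key_head_sorted_rev_ge (toks.map String.toList) (fun t => t.length)
          (hS.trans hcons) tok hmem
      rw [hcons]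
      simp only [List.headD_cons]
      omega
    have hin : ∀ i ∈ List.range (min (S.headD []).length text.toList.length),
        i + 1 ≤ text.toList.length := by
      intro i hi
      have := List.mem_range.mp hi
      omega
    rw [pvALoop_norm _ _ _ hin]
    have hmap : (List.range (min (S.headD []).length text.toList.length)).map (· + 1)
        = List.range' 1 (min (S.headD []).length text.toList.length) := by
      rw [List.range'_eq_map_range]
      exact List.map_congr_left (fun a _ => Nat.add_comm a 1)
    rw [hmap, pvAFun_char, pvFoldl_merge _ S none,
        show pvMerge none (pvBest text.toList S) = pvBest text.toList S from rfl,
        pvBest_eq_best' _ _ (min_le_right _ _) S hbound, pvBest'_char]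
    cases hf : (List.range' 1 (min (S.headD []).length text.toList.length)).find?
        (fun L => S.any (pvQ text.toList L)) with
    | none => rfl
    | some L =>
      obtain ⟨t1, ht1⟩ := pvAny_find? S (pvQ text.toList L) (by simpa using List.find?_some hf)
      simp [ht1]
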